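-- pv_equiv track=rewrite | github.com/mrbartrns/algorithm-and-structure | programmers/lv2_review/lv2_9.py | solve
-- ===== SOURCE A (Python) =====
-- def solve(string, k):
--     last = string[0:k]
--     cnt = 1
--     new_string = ""
--     for i in range(k, len(string), k):
--         cur = string[i : i + k]
--         if last == cur:
--             cnt += 1
--         else:
--             if cnt > 1:
--                 new_string += str(cnt) + last
--             else:
--                 new_string += last
--             last = cur
--             cnt = 1
--
--     if cnt > 1:
--         new_string += str(cnt) + last
--     else:
--         new_string += last
--
--     return new_string
-- ===== SOURCE B (Python) =====
-- def solve(string, k):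
--     chunks = [string[i:i + k] for i in range(0, len(string), k)]
--     n = len(chunks)
--     starts = [i for i in range(n) if i == 0 or chunks[i] != chunks[i - 1]]
--     ends = starts[1:] + [n]
--     return "".join(
--         (str(e - s) if e - s > 1 else "") + chunks[s]
--         for s, e in zip(starts, ends))
-- ===== Notes on version B (the rewrite author's own statement) =====
-- stated objective: alternative
-- what changed: Replaces A's streaming last/cnt counter state machine (with a duplicated trailing flush) by three staged passes: build the chunk list, select run-boundary indices with a filter, then render each run from adjacent (start, end) index pairs by arithmetic on the boundary list.
-- outside the precondition, e.g. on solve('aab', -1): A returns 'aa', B returns ''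
import Mathlib
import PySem

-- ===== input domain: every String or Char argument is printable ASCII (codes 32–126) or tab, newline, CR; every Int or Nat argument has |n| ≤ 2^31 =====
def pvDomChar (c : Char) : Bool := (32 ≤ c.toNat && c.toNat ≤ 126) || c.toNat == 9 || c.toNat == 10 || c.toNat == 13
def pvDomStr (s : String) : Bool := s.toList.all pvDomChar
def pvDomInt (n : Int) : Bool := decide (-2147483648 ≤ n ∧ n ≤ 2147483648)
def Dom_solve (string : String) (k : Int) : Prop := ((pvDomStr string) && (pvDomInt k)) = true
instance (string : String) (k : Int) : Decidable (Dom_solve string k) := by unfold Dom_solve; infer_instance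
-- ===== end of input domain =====

-- B replaces A's streaming last/cnt counter by staged passes: chunk list, a filter selecting
-- run-boundary indices, then rendering from adjacent (start, end) index pairs (objective: alternative).

-- ===== PORT A =====
-- A's loop body on the current chunk: state (last, cnt, new_string); branches in A's order.
def solveBody (st : List Char × Int × List Char) (cur : List Char) :
    List Char × Int × List Char :=
  if st.1 == cur then (st.1, st.2.1 + 1, st.2.2)
  else (cur, 1, st.2.2 ++ (if st.2.1 > 1 then PySem.Int.toChars st.2.1 ++ st.1 else st.1))

def solveStep (cs : List Char) (k : Int) (st : List Char × Int × List Char) (i : Int) :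
    List Char × Int × List Char :=
  solveBody st (PySem.List.slice cs (some i) (some (i + k)))

def solve (string : String) (k : Int) : String :=
  let cs := string.toList
  let last := PySem.List.slice cs (some 0) (some k)
  let st := (PySem.List.pyRange k (cs.length : Int) k).foldl (solveStep cs k) (last, 1, ([] : List Char))
  String.ofList (st.2.2 ++ (if st.2.1 > 1 then PySem.Int.toChars st.2.1 ++ st.1 else st.1))

-- ===== PORT B =====
-- Source B's boundary filter: [i for i in range(n) if i == 0 or chunks[i] != chunks[i-1]]
def startsB (chunks : List (List Char)) : List Nat :=
  (List.range chunks.length).filter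
    (fun i => i == 0 || !(chunks.getD i [] == chunks.getD (i - 1) []))

-- Source B's rendering of one (start, end) pair: (str(e-s) if e-s > 1 else "") + chunks[s]
def emitB (chunks : List (List Char)) (p : Nat × Nat) : List Char :=
  (if ((p.2 : Int) - p.1) > 1 then PySem.Int.toChars ((p.2 : Int) - p.1) else []) ++ chunks.getD p.1 []

def solve_alt (string : String) (k : Int) : String :=
  let cs := string.toList
  let chunks := (PySem.List.pyRange 0 (cs.length : Int) k).map
      (fun i => PySem.List.slice cs (some i) (some (i + k)))
  let starts := startsB chunks
  let ends := starts.drop 1 ++ [chunks.length]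
  String.ofList (PySem.Chars.join [] ((starts.zip ends).map (emitB chunks)))

-- ===== PRECONDITION & SPEC =====
-- Pre_ excludes k = 0 (range step 0: A raises ValueError, so does B) and k < 0, which is outside
-- the natural domain of chunk size; there A merely returns the slice string[0:k], an artefact.
def Pre_solve (string : String) (k : Int) : Prop := 1 ≤ k
instance (string : String) (k : Int) : Decidable (Pre_solve string k) := by unfold Pre_solve; infer_instance
def pvWitness_solve : String × Int := ("aabbaccc", 2)
def Spec_solve (string : String) (k : Int) (out : String) : Prop := out = solve_alt string k
instance (string : String) (k : Int) (out : String) : Decidable (Spec_solve string k out) := by unfold Spec_solve; infer_instance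

-- ===== CLAIM (what is proved, stated in full; the proofs are below) =====
def Claim_equal_solve : Prop := ∀ (string : String) (k : Int), Dom_solve string k → Pre_solve string k → Spec_solve string k (solve string k)

-- ===== LEMMAS AND PROOFS =====

-- run-length grouping of a chunk list, the common characterisation both ports are reduced to
def solveRuns (chunks : List (List Char)) : List (List Char × Int) :=
  match chunks with
  | [] => []
  | c :: rest =>
      let m := (rest.takeWhile (fun x => x == c)).length
      (c, (m : Int) + 1) :: solveRuns (rest.drop m)
termination_by chunks.length
decreasing_by simp

def emitRun (p : List Char × Int) : List Char :=
  (if p.2 > 1 then PySem.Int.toChars p.2 ++ p.1 else p.1)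

def renderRuns (rs : List (List Char × Int)) : List Char :=
  PySem.Chars.join [] (rs.map emitRun)

theorem renderRuns_nil : renderRuns [] = [] := by
  simp [renderRuns, PySem.Chars.join_nil]

theorem renderRuns_cons (p : List Char × Int) (rs : List (List Char × Int)) :
    renderRuns (p :: rs) = emitRun p ++ renderRuns rs := by
  simp [renderRuns, PySem.Chars.join, List.intercalate]
  cases rs <;> simp

-- A's loop over any chunk list L, finished by the trailing flush, equals the rendering of the
-- runs of the carried (last, cnt) followed by L.
theorem loop_runs :
    ∀ (L : List (List Char)) (last : List Char) (cnt : Int) (ns : List Char),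
    (let st := L.foldl solveBody (last, cnt, ns)
     st.2.2 ++ (if st.2.1 > 1 then PySem.Int.toChars st.2.1 ++ st.1 else st.1)) =
    ns ++ renderRuns ((last, cnt + ((L.takeWhile (fun x => x == last)).length : Int)) ::
        solveRuns (L.drop (L.takeWhile (fun x => x == last)).length)) := by
  intro L
  induction L with
  | nil =>
      intro last cnt ns
      simp [renderRuns_cons, renderRuns_nil, emitRun, solveRuns]
  | cons c rest ih =>
      intro last cnt ns
      by_cases hc : c = last
      · subst hc
        simp only [List.foldl_cons, beq_self_eq_true, if_true, List.takeWhile_cons,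
          List.length_cons, List.drop_succ_cons]
        rw [show solveBody (c, cnt, ns) c = (c, cnt + 1, ns) from by simp [solveBody]]
        have := ih c (cnt + 1) ns
        simp only at this
        rw [this]
        congr 2
        push_cast
        ring_nf
      · have hbe : (last == c) = false := beq_eq_false_iff_ne.mpr (Ne.symm hc)
        have hbe' : (c == last) = false := beq_eq_false_iff_ne.mpr hc
        simp only [List.foldl_cons, List.takeWhile_cons, hbe',
          Bool.false_eq_true, if_false, List.length_nil, List.drop_zero, Nat.cast_zero, add_zero]
        rw [show solveBody (last, cnt, ns) c
              = (c, 1, ns ++ (if cnt > 1 then PySem.Int.toChars cnt ++ last else last))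
            from by simp [solveBody, hbe]]
        have := ih c 1 (ns ++ (if cnt > 1 then PySem.Int.toChars cnt ++ last else last))
        simp only at this
        rw [this]
        rw [renderRuns_cons (last, cnt)]
        have hstep : solveRuns (c :: rest) = (c, ((rest.takeWhile (fun x => x == c)).length : Int) + 1)
            :: solveRuns (rest.drop (rest.takeWhile (fun x => x == c)).length) := by
          rw [solveRuns.eq_def]
        rw [show ((rest.takeWhile (fun x => x == c)).length : Int) + 1
              = 1 + ((rest.takeWhile (fun x => x == c)).length : Int) from by ring] at hstep
        rw [hstep, renderRuns_cons]
        simp only [emitRun, List.append_assoc]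

-- B's render of a chunk list
def renderB (L : List (List Char)) : List Char :=
  PySem.Chars.join [] (((startsB L).zip ((startsB L).drop 1 ++ [L.length])).map (emitB L))

theorem drop_takeWhile {a : Type} (p : a -> Bool) : forall (l : List a), l.drop (l.takeWhile p).length = l.dropWhile p := by
  intro l
  induction l with
  | nil => rfl
  | cons x t ih =>
      by_cases h : p x
      . simp [h, ih]
      . simp [h]

theorem join_cons (x : List Char) (l : List (List Char)) :
    PySem.Chars.join [] (x :: l) = x ++ PySem.Chars.join [] l := by
  simp [PySem.Chars.join, List.intercalate]
  cases l <;> simp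

theorem getD_shift (c : List Char) (t r' : List (List Char)) (j : Nat) :
    (c :: (t ++ r')).getD (t.length + 1 + j) [] = r'.getD j [] := by
  rw [show t.length + 1 + j = (t.length + j) + 1 from by omega, List.getD_cons_succ,
      List.getD_append_right t r' [] (t.length + j) (by omega)]
  congr 1
  omega

theorem getD_prefix (c : List Char) (t r' : List (List Char))
    (h : forall x, x ∈ t -> (x == c) = true) (j : Nat) (hj : j < t.length + 1) :
    (c :: (t ++ r')).getD j [] = c := by
  cases j with
  | zero => rfl
  | succ j' =>
      rw [List.getD_cons_succ, List.getD_append t r' [] j' (by omega),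
          List.getD_eq_getElem t [] (by omega)]
      exact eq_of_beq (h _ (List.getElem_mem _))

theorem emitB_zero (c : List Char) (rest : List (List Char)) (e : Nat) :
    emitB (c :: rest) (0, e) = emitRun (c, (e : Int)) := by
  unfold emitB emitRun
  simp only [List.getD_cons_zero, Nat.cast_zero, sub_zero]
  split_ifs <;> simp

theorem emitB_shift (c : List Char) (t r' : List (List Char)) (p : Nat × Nat) :
    emitB (c :: (t ++ r')) (p.1 + (t.length + 1), p.2 + (t.length + 1)) = emitB r' p := by
  unfold emitB
  simp only
  have hg : (c :: (t ++ r')).getD (p.1 + (t.length + 1)) [] = r'.getD p.1 [] := by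
    rw [show p.1 + (t.length + 1) = t.length + 1 + p.1 from by omega]
    exact getD_shift c t r' p.1
  rw [hg]
  have hc : ((p.2 + (t.length + 1) : Nat) : Int) - ((p.1 + (t.length + 1) : Nat) : Int)
      = ((p.2 : Nat) : Int) - ((p.1 : Nat) : Int) := by push_cast; ring
  rw [hc]

-- the boundary filter of a list that starts with a run of copies of c followed by r'
theorem startsB_aux (c : List Char) (t r' : List (List Char))
    (hall : forall x, x ∈ t -> (x == c) = true)
    (hhead : forall b rr, r' = b :: rr -> (b == c) = false) :
    startsB (c :: (t ++ r')) = 0 :: (startsB r').map (· + (t.length + 1)) := by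
  unfold startsB
  rw [show (c :: (t ++ r')).length = (t.length + 1) + r'.length from by simp; omega]
  rw [List.range_add, List.filter_append]
  have h1 : (List.range (t.length + 1)).filter
      (fun i => i == 0 || !((c :: (t ++ r')).getD i [] == (c :: (t ++ r')).getD (i - 1) [])) = [0] := by
    rw [List.range_succ_eq_map, List.filter_cons]
    simp only [beq_self_eq_true, Bool.true_or, if_true]
    rw [List.filter_map]
    have hnil : (List.range t.length).filter
        ((fun i => i == 0 || !((c :: (t ++ r')).getD i [] == (c :: (t ++ r')).getD (i - 1) [])) ∘ Nat.succ) = [] := by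
      rw [List.filter_eq_nil_iff]
      intro j hj
      have hjm : j < t.length := List.mem_range.mp hj
      simp only [Function.comp]
      rw [getD_prefix c t r' hall (j + 1) (by omega), getD_prefix c t r' hall (j + 1 - 1) (by omega)]
      simp
    rw [hnil]
    rfl
  rw [h1]
  have h2 : ((List.range r'.length).map (fun x => t.length + 1 + x)).filter
      (fun i => i == 0 || !((c :: (t ++ r')).getD i [] == (c :: (t ++ r')).getD (i - 1) [])) =
      ((List.range r'.length).filter
        (fun i => i == 0 || !(r'.getD i [] == r'.getD (i - 1) []))).map (· + (t.length + 1)) := by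
    rw [List.filter_map]
    have hcong : (List.range r'.length).filter
        ((fun i => i == 0 || !((c :: (t ++ r')).getD i [] == (c :: (t ++ r')).getD (i - 1) [])) ∘ (fun x => t.length + 1 + x)) =
        (List.range r'.length).filter
        (fun i => i == 0 || !(r'.getD i [] == r'.getD (i - 1) [])) := by
      apply List.filter_congr
      intro j hj
      have hjr : j < r'.length := List.mem_range.mp hj
      simp only [Function.comp]
      cases j with
      | zero =>
          obtain ⟨b, rr, hb⟩ : ∃ b rr, r' = b :: rr := by
            cases hr2 : r' with
            | nil => rw [hr2] at hjr; simp at hjr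
            | cons b rr => exact ⟨b, rr, rfl⟩
          have hne : (b == c) = false := hhead b rr hb
          have hz : (c :: (t ++ r')).getD (t.length + 1 + 0) [] = b := by
            rw [getD_shift, hb, List.getD_cons_zero]
          have hp : (c :: (t ++ r')).getD (t.length + 1 + 0 - 1) [] = c :=
            getD_prefix c t r' hall (t.length + 1 + 0 - 1) (by omega)
          rw [hz, hp]
          simp [hne]
      | succ j' =>
          have hA : (c :: (t ++ r')).getD (t.length + 1 + (j' + 1)) [] = r'.getD (j' + 1) [] :=
            getD_shift c t r' (j' + 1)
          have hB : (c :: (t ++ r')).getD (t.length + 1 + (j' + 1) - 1) [] = r'.getD j' [] := by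
            rw [show t.length + 1 + (j' + 1) - 1 = t.length + 1 + j' from by omega]
            exact getD_shift c t r' j'
          rw [hA, hB]
          simp
    rw [hcong]
    apply List.map_congr_left
    intro j _
    omega
  rw [h2]
  rfl

theorem startsB_nonempty (x : List Char) (xs : List (List Char)) :
    ∃ T, startsB (x :: xs) = 0 :: T := by
  unfold startsB
  rw [List.length_cons, List.range_succ_eq_map, List.filter_cons]
  simp only [beq_self_eq_true, Bool.true_or, if_true]
  exact ⟨_, rfl⟩

-- one step of B's rendering: the leading run comes off the front
theorem renderB_aux (c : List Char) (t r' : List (List Char))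
    (hall : forall x, x ∈ t -> (x == c) = true)
    (hhead : forall b rr, r' = b :: rr -> (b == c) = false) :
    renderB (c :: (t ++ r')) = emitRun (c, (t.length : Int) + 1) ++ renderB r' := by
  have hS := startsB_aux c t r' hall hhead
  have hlen : (c :: (t ++ r')).length = t.length + 1 + r'.length := by simp; omega
  unfold renderB
  rw [hS, hlen]
  cases r' with
  | nil =>
      rw [show startsB ([] : List (List Char)) = [] from rfl]
      simp only [List.map_nil, List.drop_succ_cons, List.drop_nil, List.nil_append,
        List.zip_cons_cons, List.zip_nil_right, List.map_cons, List.map_nil,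
        List.length_nil, Nat.add_zero]
      rw [join_cons, PySem.Chars.join_nil, List.append_nil]
      have := emitB_zero c (t ++ []) (t.length + 1)
      rw [this]
      simp only [List.zip_nil_left, List.map_nil, PySem.Chars.join_nil, List.append_nil]
      rw [Nat.cast_add, Nat.cast_one]
  | cons b rr =>
      obtain ⟨T, hT⟩ := startsB_nonempty b rr
      rw [hT]
      simp only [List.map_cons, Nat.zero_add, List.drop_succ_cons, List.drop_zero,
        List.cons_append, List.zip_cons_cons, List.map_cons, List.length_cons]
      rw [join_cons]
      have hz : emitB (c :: (t ++ b :: rr)) (0, t.length + 1) = emitRun (c, (t.length : Int) + 1) := by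
        rw [emitB_zero]
        push_cast
        ring_nf
      rw [hz]
      congr 1
      have hLlast : (T.map (· + (t.length + 1))) ++ [t.length + 1 + (rr.length + 1)]
          = (T ++ [rr.length + 1]).map (· + (t.length + 1)) := by
        rw [List.map_append]
        simp [Nat.add_comm]
      rw [hLlast]
      rw [show ((t.length + 1) :: T.map (· + (t.length + 1)))
            = (0 :: T).map (· + (t.length + 1)) from by simp]
      rw [List.zip_map, List.map_map]
      have hfun : (emitB (c :: (t ++ b :: rr))) ∘ (Prod.map (· + (t.length + 1)) (· + (t.length + 1)))
          = emitB (b :: rr) := by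
        funext p
        simpa [Prod.map] using emitB_shift c t (b :: rr) p
      rw [hfun]

theorem renderB_len : forall (n : Nat) (L : List (List Char)), L.length ≤ n ->
    renderB L = renderRuns (solveRuns L) := by
  intro n
  induction n with
  | zero =>
      intro L hL
      have : L = [] := List.eq_nil_of_length_eq_zero (by omega)
      subst this
      rw [solveRuns.eq_def]
      simp [renderB, startsB, renderRuns, PySem.Chars.join_nil]
  | succ n ih =>
      intro L hL
      cases L with
      | nil =>
          rw [solveRuns.eq_def]
          simp [renderB, startsB, renderRuns, PySem.Chars.join_nil]
      | cons c rest =>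
          have hall : forall x, x ∈ rest.takeWhile (fun y => y == c) -> (x == c) = true := by
            intro x hx
            exact List.mem_takeWhile_imp (p := fun y => y == c) hx
          have hhead : forall b rr, rest.dropWhile (fun y => y == c) = b :: rr -> (b == c) = false := by
            intro b rr hb
            have := List.head_dropWhile_not (fun y => y == c) (l := rest) (by rw [hb]; simp)
            simpa [hb] using this
          have hrun : solveRuns (c :: rest)
              = (c, ((rest.takeWhile (fun y => y == c)).length : Int) + 1)
                :: solveRuns (rest.dropWhile (fun y => y == c)) := by
            rw [solveRuns.eq_def]
            simp only
            rw [drop_takeWhile]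
          have hsplit : renderB (c :: rest)
              = emitRun (c, ((rest.takeWhile (fun y => y == c)).length : Int) + 1)
                ++ renderB (rest.dropWhile (fun y => y == c)) := by
            conv_lhs => rw [← List.takeWhile_append_dropWhile (p := fun y => y == c) (l := rest)]
            exact renderB_aux c _ _ hall hhead
          have hdlen := congrArg List.length
            (List.takeWhile_append_dropWhile (p := fun y => y == c) (l := rest))
          rw [List.length_append] at hdlen
          rw [hrun, renderRuns_cons, hsplit, ih _ (by simp at hL ⊢; omega)]

theorem renderB_runs (L : List (List Char)) : renderB L = renderRuns (solveRuns L) :=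
  renderB_len L.length L (le_refl _)

-- the chunk-index range peels its first element
theorem pyRange_chunk_cons (len k : Int) (hk : 1 ≤ k) (hlen : 0 < len) :
    PySem.List.pyRange 0 len k = 0 :: PySem.List.pyRange k len k := by
  rw [PySem.List.pyRange_of_pos 0 len (by omega), PySem.List.pyRange_of_pos k len (by omega)]
  have h0 : (0 : Int) < len := hlen
  simp only [h0, if_true, sub_zero]
  have hq0 : 0 ≤ (len - 1) / k := Int.ediv_nonneg (by omega) (by omega)
  have hsplit : (len + k - 1) / k = (len - 1) / k + 1 := by
    have : len + k - 1 = (len - 1) + 1 * k := by ring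
    rw [this, Int.add_mul_ediv_right _ _ (by omega : k ≠ 0)]
  by_cases hkl : k < len
  · simp only [hkl, if_true]
    have harg : len - k + k - 1 = len - 1 := by ring
    rw [harg, hsplit]
    rw [Int.toNat_add hq0 (by omega)]
    simp only [Int.toNat_one]
    rw [List.range_succ_eq_map]
    simp [Function.comp, mul_add]
    intro a _
    ring
  · simp only [hkl, if_false]
    have : (len - 1) / k = 0 := Int.ediv_eq_zero_of_lt (by omega) (by omega)
    rw [hsplit, this]
    simp

theorem solve_alt_renderB (string : String) (k : Int) :
    solve_alt string k = String.ofList (renderB ((PySem.List.pyRange 0 ((string.toList.length : Int)) k).map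
      (fun i => PySem.List.slice string.toList (some i) (some (i + k))))) := by
  rfl

theorem solve_eq_alt (string : String) (k : Int) (hk : 1 ≤ k) :
    solve string k = solve_alt string k := by
  rw [solve_alt_renderB]
  unfold solve
  cases hcs : string.toList with
  | nil =>
      have h1 : PySem.List.pyRange k 0 k = [] := by
        rw [PySem.List.pyRange_of_pos _ _ (by omega : (0:Int) < k)]
        simp [show ¬ (k < 0) from by omega]
      have h2 : PySem.List.pyRange 0 0 k = [] := by
        rw [PySem.List.pyRange_of_pos _ _ (by omega : (0:Int) < k)]
        simp
      simp only [List.length_nil, Nat.cast_zero, h1, h2, List.map_nil, List.foldl_nil]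
      rw [show renderB [] = [] from by simp [renderB, startsB, PySem.Chars.join_nil]]
      simp [PySem.List.slice]
  | cons c0 rest =>
      set cs : List Char := c0 :: rest with hcsdef
      dsimp only
      have hlen : 0 < (cs.length : Int) := by simp [hcsdef]
      have hrange := pyRange_chunk_cons (cs.length : Int) k hk hlen
      have hfold : (PySem.List.pyRange k (cs.length : Int) k).foldl
            (fun st i => solveBody st (PySem.List.slice cs (some i) (some (i + k))))
            (PySem.List.slice cs (some 0) (some k), 1, ([] : List Char))
          = ((PySem.List.pyRange k (cs.length : Int) k).map
              (fun i => PySem.List.slice cs (some i) (some (i + k)))).foldl solveBody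
            (PySem.List.slice cs (some 0) (some k), 1, ([] : List Char)) := by
        rw [List.foldl_map]
      rw [show solveStep cs k = fun st i => solveBody st (PySem.List.slice cs (some i) (some (i + k))) from rfl]
      rw [hfold, loop_runs _ _ 1 []]
      have hmap : (PySem.List.pyRange 0 (cs.length : Int) k).map
            (fun i => PySem.List.slice cs (some i) (some (i + k)))
          = PySem.List.slice cs (some 0) (some k)
            :: (PySem.List.pyRange k (cs.length : Int) k).map
              (fun i => PySem.List.slice cs (some i) (some (i + k))) := by
        rw [hrange]; simp
      rw [renderB_runs, hmap]
      set L := (PySem.List.pyRange k (cs.length : Int) k).map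
        (fun i => PySem.List.slice cs (some i) (some (i + k))) with hL
      have hstep : solveRuns (PySem.List.slice cs (some 0) (some k) :: L)
          = (PySem.List.slice cs (some 0) (some k),
             ((L.takeWhile (fun x => x == PySem.List.slice cs (some 0) (some k))).length : Int) + 1)
            :: solveRuns (L.drop (L.takeWhile (fun x => x == PySem.List.slice cs (some 0) (some k))).length) := by
        rw [solveRuns.eq_def]
      rw [hstep]
      simp only [List.nil_append]
      rw [show (1 : Int) + ((L.takeWhile (fun x => x == PySem.List.slice cs (some 0) (some k))).length : Int)
            = ((L.takeWhile (fun x => x == PySem.List.slice cs (some 0) (some k))).length : Int) + 1 from by ring]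

-- ===== VERDICT (by name: the statement is the Claim_ definition above) =====
theorem solve_spec : Claim_equal_solve := by
  intro string k _ hpre
  unfold Spec_solve
  exact solve_eq_alt string k hpre
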